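-- pv_equiv track=rewrite | github.com/Lenin-Franklin/BSE_AnnualReports_Scraper | OG scrapper.py | has_evidence
-- ===== SOURCE A (Python) =====
-- WINDOW = 1
--
-- def has_evidence(sents, idx):
--     words = [
--         "implemented", "established", "maintained",
--         "audit", "certified", "monitored",
--         "trained", "reviewed"
--     ]
--     lo, hi = max(0, idx - WINDOW), min(len(sents) - 1, idx + WINDOW)
--     return any(any(w in sents[i].lower() for w in words) for i in range(lo, hi + 1))
-- ===== SOURCE B (Python) =====
-- WINDOW = 1
--
-- WORDS = [
--     "implemented", "established", "maintained",
--     "audit", "certified", "monitored",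
--     "trained", "reviewed"
-- ]
--
-- def has_evidence(sents, idx):
--     lo = max(0, idx - WINDOW)
--     hi = min(len(sents) - 1, idx + WINDOW)
--     if hi < lo:
--         return False
--     text = " ".join(sents[lo:hi + 1]).lower()
--     return any(w in text for w in WORDS)
-- ===== Notes on version B (the rewrite author's own statement) =====
-- stated objective: simpler
-- what changed: B replaces A's nested per-index, per-sentence keyword scan with a single pass: it joins the window slice into one space-separated lowered string and tests each keyword once against it (a space separator and space-free keywords make this exact).
import Mathlib
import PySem

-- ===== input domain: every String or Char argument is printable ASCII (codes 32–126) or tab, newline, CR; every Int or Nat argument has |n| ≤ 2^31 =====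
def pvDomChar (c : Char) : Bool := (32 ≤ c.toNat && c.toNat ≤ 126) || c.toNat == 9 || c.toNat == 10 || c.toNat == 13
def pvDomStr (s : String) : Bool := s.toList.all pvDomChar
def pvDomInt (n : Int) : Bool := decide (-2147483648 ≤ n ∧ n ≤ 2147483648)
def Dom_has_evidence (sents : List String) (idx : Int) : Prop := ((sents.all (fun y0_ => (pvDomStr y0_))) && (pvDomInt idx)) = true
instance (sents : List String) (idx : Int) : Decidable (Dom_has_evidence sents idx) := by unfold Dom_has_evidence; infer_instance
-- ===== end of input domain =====

-- B joins the window sentences into one lowered string and scans the fixed keyword list once,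
-- replacing A's per-index, per-sentence nested scan (objective: simpler decomposition, same cost).

-- ===== PORT A =====
def has_evidence (sents : List String) (idx : Int) : Bool :=
  let words : List String := ["implemented", "established", "maintained",
    "audit", "certified", "monitored", "trained", "reviewed"]
  let lo : Int := max 0 (idx - 1)
  let hi : Int := min (PySem.List.len sents - 1) (idx + 1)
  (PySem.List.pyRange lo (hi + 1) 1).any (fun i =>
    words.any (fun w => PySem.Str.isIn w (PySem.Str.lower (PySem.List.pyGetD sents i ""))))

-- ===== PORT B =====
def pvWordsB : List String := ["implemented", "established", "maintained",
  "audit", "certified", "monitored", "trained", "reviewed"]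

def has_evidence_alt (sents : List String) (idx : Int) : Bool :=
  let lo : Int := max 0 (idx - 1)
  let hi : Int := min (PySem.List.len sents - 1) (idx + 1)
  if hi < lo then false
  else
    let text := PySem.Str.lower (PySem.Str.join " " (PySem.List.slice sents (some lo) (some (hi + 1))))
    pvWordsB.any (fun w => PySem.Str.isIn w text)

-- ===== PRECONDITION & SPEC =====
def Spec_has_evidence (sents : List String) (idx : Int) (out : Bool) : Prop := out = has_evidence_alt sents idx
instance (sents : List String) (idx : Int) (out : Bool) : Decidable (Spec_has_evidence sents idx out) := by unfold Spec_has_evidence; infer_instance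

-- ===== CLAIM (what is proved, stated in full; the proofs are below) =====
def Claim_equal_has_evidence : Prop := ∀ (sents : List String) (idx : Int), Dom_has_evidence sents idx → Spec_has_evidence sents idx (has_evidence sents idx)

-- ===== LEMMAS AND PROOFS =====

theorem pv_infix_append_space {w : List Char} (hw : ' ' ∉ w) :
    ∀ (a b : List Char), (w <:+: (a ++ ' ' :: b)) ↔ (w <:+: a ∨ w <:+: b) := by
  intro a
  induction a with
  | nil =>
    intro b
    constructor
    · intro h
      rcases List.infix_cons_iff.mp h with hp | hi
      · cases w with
        | nil => exact Or.inl (List.nil_infix)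
        | cons c w' =>
          rcases hp with ⟨t, ht⟩
          cases ht
          exact absurd (List.mem_cons_self) hw
      · exact Or.inr hi
    · rintro (h | h)
      · rcases List.eq_nil_of_infix_nil h with rfl
        exact List.nil_infix
      · exact h.trans (List.suffix_cons ' ' b).isInfix
  | cons c a' ih =>
    intro b
    constructor
    · intro h
      rcases List.infix_cons_iff.mp h with hp | hi
      · by_cases hlen : w.length ≤ a'.length + 1
        · have h2 : (c :: a') <+: (c :: a' ++ ' ' :: b) := List.prefix_append _ _
          rw [List.cons_append] at h2
          have := List.prefix_of_prefix_length_le hp h2 (by simpa using hlen)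
          exact Or.inl this.isInfix
        · exfalso
          have hi' : a'.length + 1 < w.length := by omega
          have h1 := hp.getElem (i := a'.length + 1) hi'
          have hr : (c :: (a' ++ ' ' :: b))[a'.length + 1] = ' ' := by
            simp
          exact hw ((h1.trans hr) ▸ List.getElem_mem hi')
      · rcases (ih b).mp hi with h' | h'
        · exact Or.inl (h'.trans (List.suffix_cons c a').isInfix)
        · exact Or.inr h'
    · rintro (h | h)
      · exact h.trans (List.prefix_append (c :: a') (' ' :: b)).isInfix
      · exact h.trans ((List.suffix_cons ' ' b).trans (List.suffix_append (c :: a') (' ' :: b))).isInfix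

theorem pv_infix_join_iff {w : List Char} (hw : ' ' ∉ w) :
    ∀ (parts : List (List Char)), parts ≠ [] →
      ((w <:+: PySem.Chars.join [' '] parts) ↔ ∃ p ∈ parts, w <:+: p) := by
  intro parts
  induction parts with
  | nil => intro h; exact absurd rfl h
  | cons p ps ih =>
    intro _
    cases ps with
    | nil =>
      simp [PySem.Chars.join, List.intercalate]
    | cons q r =>
      rw [PySem.Chars.join_cons_cons]
      have : p ++ [' '] ++ PySem.Chars.join [' '] (q :: r) = p ++ ' ' :: PySem.Chars.join [' '] (q :: r) := by
        simp
      rw [this, pv_infix_append_space hw, ih (by simp)]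
      simp

theorem pv_lower_join : ∀ (l : List (List Char)),
    PySem.Chars.lower (PySem.Chars.join [' '] l) = PySem.Chars.join [' '] (l.map PySem.Chars.lower) := by
  intro l
  induction l with
  | nil => rfl
  | cons p ps ih =>
    cases ps with
    | nil => simp [PySem.Chars.join, List.intercalate]
    | cons q r =>
      rw [PySem.Chars.join_cons_cons, List.map_cons, List.map_cons, PySem.Chars.join_cons_cons,
        ← List.map_cons (f := PySem.Chars.lower) (a := q) (l := r), ← ih]
      simp [PySem.Chars.lower, PySem.Chars.lowerChar]
      decide

theorem pv_words_space_free : ∀ w ∈ pvWordsB, ' ' ∉ w.toList := by decide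

theorem pv_main (sents : List String) (idx : Int) :
    has_evidence sents idx = has_evidence_alt sents idx := by
  simp only [has_evidence, has_evidence_alt, PySem.List.len_eq]
  set lo : Int := max 0 (idx - 1) with hlo
  set hi : Int := min ((sents.length : Int) - 1) (idx + 1) with hhi
  by_cases hwin : hi < lo
  · rw [if_pos hwin, PySem.List.pyRange_one_eq_nil (by omega)]
    rfl
  · rw [if_neg hwin]
    rw [not_lt] at hwin
    have h0lo : 0 ≤ lo := le_max_left _ _
    have hhilen : hi + 1 ≤ (sents.length : Int) := by omega
    have h0hi1 : 0 ≤ hi + 1 := by omega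
    have hlolen : lo ≤ (sents.length : Int) := by omega
    rw [PySem.List.slice_of_nonneg sents h0lo h0hi1 hlolen hhilen]
    rw [Bool.eq_iff_iff, List.any_eq_true, List.any_eq_true]
    constructor
    · rintro ⟨i, hmem, hin⟩
      rw [List.any_eq_true] at hin
      obtain ⟨w, hw, hwin'⟩ := hin
      rw [PySem.List.mem_pyRange_one] at hmem
      obtain ⟨hm1, hm2⟩ := hmem
      obtain ⟨k, rfl⟩ : ∃ k : Nat, i = (k : Int) := ⟨i.toNat, by omega⟩
      have hklen : k < sents.length := by omega
      refine ⟨w, hw, ?_⟩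
      rw [PySem.Str.isIn_iff_infix] at hwin' ⊢
      rw [PySem.Str.toList_lower, PySem.Str.toList_join,
        show (" " : String).toList = [' '] from rfl, pv_lower_join,
        pv_infix_join_iff (pv_words_space_free w hw)]
      · refine ⟨PySem.Chars.lower (sents[k]).toList, ?_, ?_⟩
        · rw [List.mem_map]
          refine ⟨(sents[k]).toList, ?_, rfl⟩
          rw [List.mem_map]
          refine ⟨sents[k], ?_, rfl⟩
          rw [List.mem_iff_getElem]
          have hjlen : k - lo.toNat < (List.take ((hi+1).toNat - lo.toNat) (List.drop lo.toNat sents)).length := by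
            simp [List.length_take, List.length_drop]
            omega
          refine ⟨k - lo.toNat, hjlen, ?_⟩
          rw [List.getElem_take, List.getElem_drop]
          congr 1
          omega
        · rw [PySem.List.pyGetD_natCast, List.getD_eq_getElem _ _ hklen, PySem.Str.toList_lower] at hwin'
          exact hwin'
      · intro hcontra
        apply_fun List.length at hcontra
        simp [List.length_take, List.length_drop] at hcontra
        omega
    · rintro ⟨w, hw, hwin'⟩
      rw [PySem.Str.isIn_iff_infix, PySem.Str.toList_lower, PySem.Str.toList_join,
        show (" " : String).toList = [' '] from rfl, pv_lower_join,
        pv_infix_join_iff (pv_words_space_free w hw)] at hwin'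
      · obtain ⟨p, hp, hinf⟩ := hwin'
        rw [List.mem_map] at hp
        obtain ⟨p1, hp1, rfl⟩ := hp
        rw [List.mem_map] at hp1
        obtain ⟨s, hs, rfl⟩ := hp1
        rw [List.mem_iff_getElem] at hs
        obtain ⟨j, hj, rfl⟩ := hs
        have hjlen : j < (hi+1).toNat - lo.toNat := by
          have := hj
          simp [List.length_take, List.length_drop] at this
          omega
        refine ⟨((lo.toNat + j : Nat) : Int), ?_, ?_⟩
        · rw [PySem.List.mem_pyRange_one]
          constructor <;> omega
        · rw [List.any_eq_true]
          refine ⟨w, hw, ?_⟩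
          rw [PySem.Str.isIn_iff_infix]
          have hklen : lo.toNat + j < sents.length := by omega
          rw [PySem.List.pyGetD_natCast, List.getD_eq_getElem _ _ hklen, PySem.Str.toList_lower]
          rw [List.getElem_take, List.getElem_drop] at hinf
          exact hinf
      · intro hcontra
        apply_fun List.length at hcontra
        simp [List.length_take, List.length_drop] at hcontra
        omega


-- ===== VERDICT (by name: the statement is the Claim_ definition above) =====
theorem has_evidence_spec : Claim_equal_has_evidence := by
  intro sents idx _
  unfold Spec_has_evidence
  exact pv_main sents idx
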